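-- pv_equiv track=rewrite | github.com/takkt-ag/watchpost | src/outpost/hostname.py | is_rfc1123_hostname
-- ===== SOURCE A (Python) =====
-- LABEL_MAX = 63
--
-- HOSTNAME_MAX = 253
--
-- def is_rfc1123_hostname(value: str) -> bool:
--     if not value or len(value) > HOSTNAME_MAX:
--         return False
--
--     # Only ASCII letters, digits, hyphens and dots overall
--     for ch in value:
--         o = ord(ch)
--         if not (97 <= o <= 122 or 48 <= o <= 57 or ch in {".", "-"} or 65 <= o <= 90):
--             return False
--
--     # Check labels
--     parts = value.split(".")
--     for label in parts:
--         if not (1 <= len(label) <= LABEL_MAX):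
--             return False
--         # Must start/end with alnum
--         if not (label[0].isalnum() and label[-1].isalnum()):
--             return False
--         # Only alnum or hyphen in label
--         for ch in label:
--             if not (ch.isalnum() or ch == "-"):
--                 return False
--     return True
-- ===== SOURCE B (Python) =====
-- HOSTNAME_MAX = 253
--
--
-- def _alnum(ch):
--     return ("a" <= ch <= "z") or ("A" <= ch <= "Z") or ("0" <= ch <= "9")
--
--
-- def is_rfc1123_hostname(value: str) -> bool:
--     # Single left-to-right pass: track the current label's length and the
--     # previous character instead of splitting into labels.
--     if not value or len(value) > HOSTNAME_MAX:
--         return False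
--     lab = 0
--     prev = "."
--     for ch in value:
--         if ch == ".":
--             if lab == 0 or not _alnum(prev):
--                 return False
--             lab = 0
--         else:
--             if lab == 0:
--                 if not _alnum(ch):
--                     return False
--             elif not (_alnum(ch) or ch == "-"):
--                 return False
--             lab += 1
--             if lab > 63:
--                 return False
--         prev = ch
--     return lab > 0 and _alnum(prev)
-- ===== Notes on version B (the rewrite author's own statement) =====
-- stated objective: alternative
-- what changed: Replaces A's whole-string charset scan plus dot-split plus per-label loops (several passes over the string) with a single left-to-right pass that tracks the current label length and previous character.
import Mathlib
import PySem

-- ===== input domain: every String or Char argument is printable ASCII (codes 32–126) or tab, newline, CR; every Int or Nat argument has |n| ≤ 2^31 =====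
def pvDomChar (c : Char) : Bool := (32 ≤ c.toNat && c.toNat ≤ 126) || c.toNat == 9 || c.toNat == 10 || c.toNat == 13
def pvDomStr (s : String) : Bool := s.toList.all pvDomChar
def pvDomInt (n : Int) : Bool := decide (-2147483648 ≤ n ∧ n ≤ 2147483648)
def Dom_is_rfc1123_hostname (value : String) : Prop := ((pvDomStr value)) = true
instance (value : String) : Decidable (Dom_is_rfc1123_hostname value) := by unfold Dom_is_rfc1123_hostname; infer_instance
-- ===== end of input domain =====

-- B replaces A's charset scan + dot-split + per-label loops with one left-to-right pass
-- tracking the current label length and the previous character (objective: alternative).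

-- ===== PORT A =====
-- charset test of A's first loop: 97<=o<=122 or 48<=o<=57 or ch in {'.','-'} or 65<=o<=90
def pvAllowedA (ch : Char) : Bool :=
  (decide (97 ≤ ch.toNat) && decide (ch.toNat ≤ 122)) ||
  (decide (48 ≤ ch.toNat) && decide (ch.toNat ≤ 57)) ||
  (ch == '.' || ch == '-') ||
  (decide (65 ≤ ch.toNat) && decide (ch.toNat ≤ 90))

-- A's per-label checks, in A's order (early returns become if-chains)
def pvLabelOK (label : List Char) : Bool :=
  if !(decide (1 ≤ label.length) && decide (label.length ≤ 63)) then false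
  else if !(PySem.Chars.isalnum (PySem.List.pyGetD label 0 ' ') &&
            PySem.Chars.isalnum (PySem.List.pyGetD label (-1) ' ')) then false
  else label.all (fun ch => PySem.Chars.isalnum ch || ch == '-')

def is_rfc1123_hostname (value : String) : Bool :=
  if value == "" || PySem.Str.len value > 253 then false
  else if !(value.toList.all pvAllowedA) then false
  else (PySem.Chars.splitOn value.toList ['.']).all pvLabelOK

-- ===== PORT B =====
-- Source B's _alnum: chained comparisons 'a'<=ch<='z' etc.
def pvAlnumB (c : Char) : Bool :=
  (decide ('a' ≤ c) && decide (c ≤ 'z')) ||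
  (decide ('A' ≤ c) && decide (c ≤ 'Z')) ||
  (decide ('0' ≤ c) && decide (c ≤ '9'))

-- Source B's for-loop: state (lab = current label length, prev = previous char)
def pvAltLoop : List Char → Nat → Char → Bool
  | [], lab, prev => decide (0 < lab) && pvAlnumB prev
  | ch :: rest, lab, prev =>
    if ch == '.' then
      if lab == 0 || !pvAlnumB prev then false
      else pvAltLoop rest 0 ch
    else
      if (if lab == 0 then !pvAlnumB ch else !(pvAlnumB ch || ch == '-')) then false
      else if 63 < lab + 1 then false
      else pvAltLoop rest (lab + 1) ch

def is_rfc1123_hostname_alt (value : String) : Bool :=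
  if value == "" || PySem.Str.len value > 253 then false
  else pvAltLoop value.toList 0 '.'

-- ===== PRECONDITION & SPEC =====
def Spec_is_rfc1123_hostname (value : String) (out : Bool) : Prop := out = is_rfc1123_hostname_alt value
instance (value : String) (out : Bool) : Decidable (Spec_is_rfc1123_hostname value out) := by unfold Spec_is_rfc1123_hostname; infer_instance

-- ===== CLAIM (what is proved, stated in full; the proofs are below) =====
def Claim_equal_is_rfc1123_hostname : Prop := ∀ (value : String), Dom_is_rfc1123_hostname value → Spec_is_rfc1123_hostname value (is_rfc1123_hostname value)

-- ===== LEMMAS AND PROOFS =====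

-- proof-side model of the dot-split: simple structural recursion
def sp : List Char → List (List Char)
  | [] => [[]]
  | c :: rest => if c = '.' then [] :: sp rest
      else match sp rest with
        | [] => [[c]]
        | h :: t => (c :: h) :: t

theorem sp_ne_nil (cs : List Char) : sp cs ≠ [] := by
  cases cs with
  | nil => simp [sp]
  | cons c rest => simp only [sp]; split <;> [skip; split] <;> simp

theorem go_eq (l : List Char) : ∀ (fuel : Nat) (cur : List Char) (acc : List (List Char)),
    l.length ≤ fuel →
    PySem.Chars.splitOn.go ['.'] fuel l cur acc
      = acc.reverse ++ ((sp l).modifyHead (fun h => cur.reverse ++ h)) := by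
  induction l with
  | nil =>
    intro fuel cur acc h
    cases fuel <;> simp [PySem.Chars.splitOn.go, sp]
  | cons c rest ih =>
    intro fuel cur acc h
    cases fuel with
    | zero => simp at h
    | succ f =>
      rw [PySem.Chars.splitOn.go]
      by_cases hc : c = '.'
      · subst hc
        rw [if_pos (by simp [List.isPrefixOf])]
        show PySem.Chars.splitOn.go ['.'] f rest [] (cur.reverse :: acc) = _
        rw [ih f [] (cur.reverse :: acc) (by simpa using h)]
        simp [sp]
        cases sp rest <;> simp
      · have hpre : (['.'].isPrefixOf (c :: rest)) = false := by
          simp [List.isPrefixOf, Ne.symm hc]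
        rw [if_neg (by simp [hpre])]
        rw [ih f (c :: cur) acc (by simpa using h)]
        have := sp_ne_nil rest
        simp only [sp, if_neg hc]
        cases hsp : sp rest with
        | nil => exact absurd hsp this
        | cons h0 t0 => simp

theorem splitOn_eq_sp (cs : List Char) : PySem.Chars.splitOn cs ['.'] = sp cs := by
  unfold PySem.Chars.splitOn
  rw [go_eq cs (cs.length + 1) [] [] (by omega)]
  cases sp cs <;> simp

theorem alnum_eq (c : Char) : PySem.Chars.isalnum c = pvAlnumB c := by
  simp [PySem.Chars.isalnum, PySem.Chars.isalpha, PySem.Chars.isupper, PySem.Chars.islower,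
    PySem.Chars.isdigit, pvAlnumB, Bool.or_comm]

theorem char_le_toNat (a c : Char) : (a ≤ c) ↔ (a.toNat ≤ c.toNat) := by
  rw [Char.le_def, UInt32.le_iff_toNat_le]; rfl

theorem char_eq_toNat (a c : Char) : (c = a) ↔ (c.toNat = a.toNat) := by
  constructor
  · intro h; rw [h]
  · intro h; exact Char.ext (UInt32.toNat_inj.mp h)

theorem allowed_iff (c : Char) : pvAllowedA c = true ↔ (pvAlnumB c = true ∨ c = '.' ∨ c = '-') := by
  simp only [pvAllowedA, pvAlnumB, char_le_toNat, char_eq_toNat, Bool.or_eq_true,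
    Bool.and_eq_true, decide_eq_true_eq, beq_iff_eq,
    show ('a').toNat = 97 from rfl, show ('z').toNat = 122 from rfl,
    show ('A').toNat = 65 from rfl, show ('Z').toNat = 90 from rfl,
    show ('0').toNat = 48 from rfl, show ('9').toNat = 57 from rfl,
    show ('.').toNat = 46 from rfl, show ('-').toNat = 45 from rfl]
  omega

theorem labelOK_all {l : List Char} (h : pvLabelOK l = true) :
    ∀ c ∈ l, (pvAlnumB c || c == '-') = true := by
  intro c hc
  unfold pvLabelOK at h
  by_cases h1 : (!(decide (1 ≤ l.length) && decide (l.length ≤ 63))) = true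
  · rw [if_pos h1] at h
    exact absurd h Bool.false_ne_true
  · rw [if_neg h1] at h
    by_cases h2 : (!(PySem.Chars.isalnum (PySem.List.pyGetD l 0 ' ') &&
        PySem.Chars.isalnum (PySem.List.pyGetD l (-1) ' '))) = true
    · rw [if_pos h2] at h
      exact absurd h Bool.false_ne_true
    · rw [if_neg h2] at h
      have h3 := List.all_eq_true.mp h c hc
      rw [alnum_eq] at h3
      exact h3

theorem labelOK_nil : pvLabelOK [] = false := by
  unfold pvLabelOK; simp

theorem labelOK_long {l : List Char} (h : 63 < l.length) : pvLabelOK l = false := by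
  unfold pvLabelOK
  rw [if_pos (by simp; omega)]

theorem labelOK_head_false {c : Char} {t : List Char} (ha : pvAlnumB c = false) :
    pvLabelOK (c :: t) = false := by
  unfold pvLabelOK
  split_ifs with h1 h2
  · rfl
  · rfl
  · exfalso
    simp only [Bool.not_eq_true', Bool.not_eq_false, Bool.and_eq_true] at h2
    have hget : PySem.List.pyGetD (c :: t) (0 : Int) ' ' = c := by
      rw [PySem.List.pyGetD_zero]; rfl
    rw [hget, alnum_eq, ha] at h2
    exact Bool.false_ne_true h2.1

theorem labelOK_badchar {l : List Char} {c : Char} (hc : c ∈ l)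
    (ha : pvAlnumB c = false) (hh : (c == '-') = false) : pvLabelOK l = false := by
  cases hOK : pvLabelOK l with
  | false => rfl
  | true =>
    have := labelOK_all hOK c hc
    rw [ha, hh] at this
    exact absurd this (by simp)

theorem mem_sp_of_mem {c : Char} {cs : List Char} (hm : c ∈ cs) (hc : c ≠ '.') :
    ∃ l ∈ sp cs, c ∈ l := by
  induction cs with
  | nil => simp at hm
  | cons d rest ih =>
    by_cases hd : d = '.'
    · subst hd
      rcases List.mem_cons.mp hm with h | h
      · exact absurd h hc
      · rcases ih h with ⟨l, hl, hcl⟩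
        exact ⟨l, by simp [sp, hl], hcl⟩
    · have hne := sp_ne_nil rest
      cases hsp : sp rest with
      | nil => exact absurd hsp hne
      | cons h0 t0 =>
        rcases List.mem_cons.mp hm with h | h
        · exact ⟨d :: h0, by simp [sp, hd, hsp], by simp [h]⟩
        · rcases ih h with ⟨l, hl, hcl⟩
          rw [hsp] at hl
          rcases List.mem_cons.mp hl with rfl | hl
          · exact ⟨d :: l, by simp [sp, hd, hsp], by simp [hcl]⟩
          · exact ⟨l, by simp [sp, hd, hsp, hl], hcl⟩

theorem charset_of_labels {cs : List Char} (h : (sp cs).all pvLabelOK = true) :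
    cs.all pvAllowedA = true := by
  rw [List.all_eq_true]
  intro c hc
  by_cases hdot : c = '.'
  · exact (allowed_iff c).mpr (Or.inr (Or.inl hdot))
  · rcases mem_sp_of_mem hc hdot with ⟨l, hl, hcl⟩
    have hOK := List.all_eq_true.mp h l hl
    have hcb : pvAlnumB c = true ∨ c = '-' := by simpa using labelOK_all hOK c hcl
    rcases hcb with hb | hb
    · exact (allowed_iff c).mpr (Or.inl hb)
    · exact (allowed_iff c).mpr (Or.inr (Or.inr hb))

theorem labelOK_inv {p : List Char} (hne : p ≠ [])
    (hh : pvAlnumB (p.head hne) = true)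
    (hall : ∀ c ∈ p, (pvAlnumB c || c == '-') = true)
    (hlen : p.length ≤ 63) :
    pvLabelOK p = pvAlnumB (p.getLast hne) := by
  have h1 : 0 < p.length := List.length_pos_iff.mpr hne
  have hc1 : (!(decide (1 ≤ p.length) && decide (p.length ≤ 63))) = false := by
    simp
    omega
  unfold pvLabelOK
  rw [hc1, if_neg Bool.false_ne_true]
  rw [PySem.List.pyGetD_zero, PySem.List.pyGetD_neg_one p ' ' hne]
  have hgd : p.getD 0 ' ' = p.head hne := by
    cases p with
    | nil => exact absurd rfl hne
    | cons a t => rfl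
  rw [hgd, alnum_eq, alnum_eq, hh]
  cases hl : pvAlnumB (p.getLast hne) with
  | false => simp
  | true =>
    simp only [Bool.true_and, Bool.not_true]
    rw [if_neg Bool.false_ne_true]
    exact List.all_eq_true.mpr (fun c hc => by rw [alnum_eq]; exact hall c hc)

theorem loop_eq (cs : List Char) :
    (∀ prev, pvAltLoop cs 0 prev = (sp cs).all pvLabelOK)
  ∧ (∀ (p : List Char) (hne : p ≠ []),
       pvAlnumB (p.head hne) = true →
       (∀ c ∈ p, (pvAlnumB c || c == '-') = true) →
       p.length ≤ 63 →
       ∀ l0 ls, sp cs = l0 :: ls →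
         pvAltLoop cs p.length (p.getLast hne) = (pvLabelOK (p ++ l0) && ls.all pvLabelOK)) := by
  induction cs with
  | nil =>
    constructor
    · intro prev
      simp [pvAltLoop, sp, labelOK_nil]
    · intro p hne hh hall hlen l0 ls hsp
      simp only [sp, List.cons.injEq] at hsp
      obtain ⟨rfl, rfl⟩ := hsp
      have h1 : 0 < p.length := List.length_pos_iff.mpr hne
      simp only [pvAltLoop, List.append_nil, List.all_nil, Bool.and_true]
      rw [labelOK_inv hne hh hall hlen]
      simp [h1]
  | cons c rest ih =>
    obtain ⟨ih1, ih2⟩ := ih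
    have hrne := sp_ne_nil rest
    constructor
    · intro prev
      by_cases hc : c = '.'
      · subst hc
        simp [pvAltLoop, sp, labelOK_nil]
      · cases hsp : sp rest with
        | nil => exact absurd hsp hrne
        | cons h0 t0 =>
          have hspc : sp (c :: rest) = (c :: h0) :: t0 := by simp [sp, hc, hsp]
          cases ha : pvAlnumB c with
          | true =>
            have hstep : pvAltLoop (c :: rest) 0 prev = pvAltLoop rest 1 c := by
              simp [pvAltLoop, hc, ha]
            rw [hstep]
            have := ih2 [c] (by simp) (by simpa using ha) (by simp [ha]) (by simp) h0 t0 hsp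
            simpa [hspc] using this
          | false =>
            have hl : pvAltLoop (c :: rest) 0 prev = false := by
              simp [pvAltLoop, hc, ha]
            rw [hl, hspc]
            simp [labelOK_head_false ha]
    · intro p hne hh hall hlen l0 ls hsp
      have hplen : 0 < p.length := List.length_pos_iff.mpr hne
      by_cases hc : c = '.'
      · subst hc
        have hspc : sp ('.' :: rest) = [] :: sp rest := by simp [sp]
        obtain ⟨rfl, rfl⟩ := List.cons_eq_cons.mp (hspc.symm.trans hsp)
        cases hlast : pvAlnumB (p.getLast hne) with
        | true =>
          have hstep : pvAltLoop ('.' :: rest) p.length (p.getLast hne)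
              = pvAltLoop rest 0 '.' := by
            simp [pvAltLoop, hplen.ne', hlast]
          rw [hstep, ih1 '.']
          rw [List.append_nil, labelOK_inv hne hh hall hlen, hlast]
          simp
        | false =>
          have hstep : pvAltLoop ('.' :: rest) p.length (p.getLast hne) = false := by
            simp [pvAltLoop, hlast]
          rw [hstep]
          rw [List.append_nil, labelOK_inv hne hh hall hlen, hlast]
          simp
      · cases hsp0 : sp rest with
        | nil => exact absurd hsp0 hrne
        | cons h0 t0 =>
          have hspc : sp (c :: rest) = (c :: h0) :: t0 := by simp [sp, hc, hsp0]
          obtain ⟨rfl, rfl⟩ := List.cons_eq_cons.mp (hspc.symm.trans hsp)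
          cases hcb : (pvAlnumB c || c == '-') with
          | false =>
            have hl : pvAltLoop (c :: rest) p.length (p.getLast hne) = false := by
              simp [pvAltLoop, hc, hplen.ne', hcb]
            rw [hl]
            rcases Bool.or_eq_false_iff.mp hcb with ⟨ha, hd⟩
            rw [labelOK_badchar (l := p ++ c :: h0) (by simp) ha hd]
            simp
          | true =>
            by_cases hlong : 63 < p.length + 1
            · have hl : pvAltLoop (c :: rest) p.length (p.getLast hne) = false := by
                simp [pvAltLoop, hc, hplen.ne', hcb, hlong]
              rw [hl]
              rw [labelOK_long (l := p ++ c :: h0) (by simp; omega)]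
              simp
            · have hstep : pvAltLoop (c :: rest) p.length (p.getLast hne)
                  = pvAltLoop rest (p.length + 1) c := by
                simp [pvAltLoop, hc, hplen.ne', hcb, hlong]
              rw [hstep]
              have hne' : p ++ [c] ≠ [] := by simp
              have hh' : pvAlnumB ((p ++ [c]).head hne') = true := by
                rw [List.head_append_of_ne_nil hne]
                exact hh
              have hall' : ∀ x ∈ p ++ [c], (pvAlnumB x || x == '-') = true := by
                intro x hx
                rcases List.mem_append.mp hx with hx | hx
                · exact hall x hx
                · simp at hx
                  subst hx
                  exact hcb
              have hlen' : (p ++ [c]).length ≤ 63 := by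
                simp
                omega
              have hmain := ih2 (p ++ [c]) hne' hh' hall' hlen' h0 t0 hsp0
              rw [List.getLast_concat] at hmain
              simp only [List.length_append, List.length_cons, List.length_nil,
                List.append_assoc, List.singleton_append] at hmain
              exact hmain

-- ===== VERDICT (by name: the statement is the Claim_ definition above) =====
theorem is_rfc1123_hostname_spec : Claim_equal_is_rfc1123_hostname := by
  intro value _
  show is_rfc1123_hostname value = is_rfc1123_hostname_alt value
  unfold is_rfc1123_hostname is_rfc1123_hostname_alt
  by_cases hg : (value == "" || PySem.Str.len value > 253) = true
  · rw [if_pos hg, if_pos hg]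
  · rw [if_neg hg, if_neg hg]
    rw [splitOn_eq_sp]
    rw [(loop_eq value.toList).1 '.']
    by_cases hall : value.toList.all pvAllowedA = true
    · rw [hall]; simp
    · rw [Bool.not_eq_true] at hall
      rw [hall]
      simp only [Bool.not_false, if_true]
      by_cases hlab : (sp value.toList).all pvLabelOK = true
      · exact absurd (charset_of_labels hlab) (by simp [hall])
      · rw [Bool.not_eq_true] at hlab
        rw [hlab]
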